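-- pv_equiv track=rewrite | github.com/vshkodin/problem-solving-with-algorithms-and-data-structures-using-python | CheckIfTwoStringArraysAreEquivalent.py | func
-- ===== SOURCE A (Python) =====
-- def func(l1,l2):
--     s1c=''
--     s2c=''
--     for i in l1:
--         s1c+=i
--     for i in l2:
--         s2c+=i
--     if s1c==s2c:
--         return True
--     else:
--         return False
-- ===== SOURCE B (Python) =====
-- from itertools import zip_longest
--
-- def func(l1, l2):
--     def chars(lst):
--         for w in lst:
--             yield from w
--     return all(a == b for a, b in zip_longest(chars(l1), chars(l2)))
-- ===== Notes on version B (the rewrite author's own statement) =====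
-- stated objective: idiomatic
-- what changed: B never builds the joined strings: it streams characters from both arrays with lazy generators and compares them pairwise via zip_longest, short-circuiting at the first mismatch, instead of A's concatenate-then-compare.
import Mathlib
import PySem

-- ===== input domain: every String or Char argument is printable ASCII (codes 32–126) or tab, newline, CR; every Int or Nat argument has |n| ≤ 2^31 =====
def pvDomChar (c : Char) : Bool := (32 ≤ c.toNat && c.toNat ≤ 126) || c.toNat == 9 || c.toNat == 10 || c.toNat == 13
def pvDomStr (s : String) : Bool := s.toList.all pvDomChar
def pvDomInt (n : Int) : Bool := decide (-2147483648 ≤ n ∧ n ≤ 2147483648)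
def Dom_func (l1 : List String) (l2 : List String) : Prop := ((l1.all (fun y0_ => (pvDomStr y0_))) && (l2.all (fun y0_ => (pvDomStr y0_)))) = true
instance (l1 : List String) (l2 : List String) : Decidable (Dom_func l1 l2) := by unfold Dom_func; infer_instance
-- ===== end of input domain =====

-- B streams characters from both arrays and compares pairwise (zip_longest), never
-- building the joined strings; objective: idiomatic. Exact equivalence, no Pre_.

-- ===== PORT A =====
-- strings are represented by their character lists (String ↔ List Char is exact);
-- '+=' is list append, the final '==' is List Char equality (= Python str equality)
def func (l1 : List String) (l2 : List String) : Bool :=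
  let s1c : List Char := l1.foldl (fun acc i => acc ++ i.toList) []
  let s2c : List Char := l2.foldl (fun acc i => acc ++ i.toList) []
  if s1c == s2c then true else false

-- ===== PORT B =====
-- the character stream of one array ('yield from' each word)
def pvChars (l : List String) : List Char := l.flatMap (fun w => w.toList)

-- all(a == b for a, b in zip_longest(xs, ys)): pairwise compare, false as soon as
-- one side is exhausted before the other or two characters differ
def pvZipAllEq : List Char → List Char → Bool
  | [], [] => true
  | [], _ :: _ => false
  | _ :: _, [] => false
  | a :: xs, b :: ys => a == b && pvZipAllEq xs ys

def func_alt (l1 : List String) (l2 : List String) : Bool :=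
  pvZipAllEq (pvChars l1) (pvChars l2)

-- ===== PRECONDITION & SPEC =====
def Spec_func (l1 : List String) (l2 : List String) (out : Bool) : Prop := out = func_alt l1 l2
instance (l1 : List String) (l2 : List String) (out : Bool) : Decidable (Spec_func l1 l2 out) := by unfold Spec_func; infer_instance

-- ===== CLAIM (what is proved, stated in full; the proofs are below) =====
def Claim_equal_func : Prop := ∀ (l1 : List String) (l2 : List String), Dom_func l1 l2 → Spec_func l1 l2 (func l1 l2)

-- ===== LEMMAS AND PROOFS =====
theorem pvZipAllEq_eq_beq (xs ys : List Char) : pvZipAllEq xs ys = (xs == ys) := by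
  induction xs generalizing ys with
  | nil => cases ys <;> simp [pvZipAllEq]
  | cons a xs ih =>
    cases ys with
    | nil => simp [pvZipAllEq]
    | cons b ys => simp [pvZipAllEq, ih, List.cons_beq_cons]

-- ===== VERDICT (by name: the statement is the Claim_ definition above) =====
theorem func_spec : Claim_equal_func := by
  intro l1 l2 _
  unfold Spec_func func func_alt
  rw [pvZipAllEq_eq_beq]
  simp only [pvChars, List.flatMap_def]
  rw [Bool.eq_iff_iff]
  simp
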